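-- pv_equiv track=rewrite | github.com/Ferri-bernabe/TFG | heuristics.py | multipleInputsForUserImproved
-- ===== SOURCE A (Python) =====
-- def multipleInputsForUserImproved(user_address, transactions_list):
--     user_cluster_list = []
--     temp_list = {}
--     user_cluster_list.append(user_address)
--     temp_list[user_address] = False
--
--     trobat = False
--     while trobat == False:
--         temp_list2 = temp_list.copy()
--         for x in temp_list.keys():
--             for transaction in transactions_list:
--                 for i, inputs in enumerate(transaction):
--                     if i % 2 == 0: # si el índice es divisible entre 2
--                         for inputt in inputs:
--                             if x in inputt:
--                                 for i in range(0,len(inputs)):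
--                                     if inputs[i][0] not in user_cluster_list:
--                                         user_cluster_list.append(inputs[i][0])
--                                         temp_list2[inputs[i][0]] = False
--             temp_list2[x] = True
--
--         temp_list = temp_list2.copy()
--         trobat2 = True
--         for y in temp_list2.values():
--             if y == False:
--                 trobat2 = False
--                 trobat = False
--         if trobat2:
--             trobat = True
--     return user_cluster_list
-- ===== SOURCE B (Python) =====
-- def multipleInputsForUserImproved(user_address, transactions_list):
--     # Collect the even-index input-groups once, then do a single queue BFS,
--     # processing each cluster address exactly once, with a set for membership tests.
--     groups = []
--     for transaction in transactions_list:
--         for i in range(0, len(transaction), 2):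
--             groups.append(transaction[i])
--     cluster = [user_address]
--     seen = {user_address}
--     qi = 0
--     while qi < len(cluster):
--         x = cluster[qi]
--         qi += 1
--         for inputs in groups:
--             if any(x in inputt for inputt in inputs):
--                 for inputt in inputs:
--                     a = inputt[0]
--                     if a not in seen:
--                         seen.add(a)
--                         cluster.append(a)
--     return cluster
-- ===== Notes on version B (the rewrite author's own statement) =====
-- stated objective: faster
-- what changed: A repeatedly re-scans every address in a dict-of-flags fixpoint loop (each round walks all cluster addresses over all transactions, with O(|cluster|) list membership tests) ; B precollects the even-index input groups once and runs a single queue BFS that processes each cluster address exactly once, using a set for membership.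
-- outside the precondition, e.g. on multipleInputsForUserImproved('a', [[[()]]]): A returns ['a'], B returns ['a']
import Mathlib
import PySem

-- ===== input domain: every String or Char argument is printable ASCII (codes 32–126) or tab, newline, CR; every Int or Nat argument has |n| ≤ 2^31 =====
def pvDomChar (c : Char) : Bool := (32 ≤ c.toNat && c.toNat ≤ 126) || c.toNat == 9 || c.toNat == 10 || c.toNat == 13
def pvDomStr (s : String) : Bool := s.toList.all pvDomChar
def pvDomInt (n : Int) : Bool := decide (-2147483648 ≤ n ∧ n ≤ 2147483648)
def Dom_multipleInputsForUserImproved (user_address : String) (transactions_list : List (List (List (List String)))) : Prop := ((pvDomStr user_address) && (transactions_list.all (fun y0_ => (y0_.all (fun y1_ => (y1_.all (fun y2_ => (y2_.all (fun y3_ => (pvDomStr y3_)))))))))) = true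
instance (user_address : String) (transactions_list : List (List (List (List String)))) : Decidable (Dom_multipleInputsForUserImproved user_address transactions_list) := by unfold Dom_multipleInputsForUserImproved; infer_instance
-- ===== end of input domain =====

-- B replaces A's repeat-until-fixpoint re-scan of every cluster address by a single
-- queue BFS over precollected even-index input groups, processing each address once.

-- ===== PORT A =====
-- fuel for the 'while trobat == False' loop: 2 + total number of input tuples; the loop
-- adds at least one new address per iteration (addresses are heads of input tuples), so
-- this fuel is never exhausted (established inside the equivalence proof below).
def pvFuel (transactions_list : List (List (List (List String)))) : Nat :=
  (transactions_list.flatMap (fun t => t)).foldl (fun n g => n + g.length) 0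

-- body of 'for x in temp_list.keys(): for transaction in …' acting on (user_cluster_list, temp_list2)
def pvAProcess (x : String) (transactions_list : List (List (List (List String))))
    (st : List String × PySem.Dict String Bool) : List String × PySem.Dict String Bool :=
  transactions_list.foldl (fun st transaction =>
    (PySem.List.enumerate transaction 0).foldl (fun st p =>
      if PySem.Int.mod p.1 2 == 0 then          -- if i % 2 == 0
        p.2.foldl (fun st inputt =>
          if x ∈ inputt then                    -- if x in inputt
            (PySem.List.pyRange 0 (PySem.List.len p.2) 1).foldl (fun st i =>
              -- a = inputs[i][0]; head? = none is IndexError, excluded by Pre_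
              ((PySem.List.pyGetD p.2 i []).head?).elim st (fun a =>
                if a ∈ st.1 then st
                else (st.1 ++ [a], st.2.insert a false))) st
          else st) st
      else st) st) st

-- one iteration of the while loop over the snapshot temp_list.keys()
def pvARound (transactions_list : List (List (List (List String))))
    (c : List String) (tl : PySem.Dict String Bool) : List String × PySem.Dict String Bool :=
  tl.keys.foldl (fun st x =>
    let st := pvAProcess x transactions_list st
    (st.1, st.2.insert x true)) (c, tl)         -- temp_list2[x] = True

def pvALoop (transactions_list : List (List (List (List String)))) (fuel : Nat)
    (c : List String) (tl : PySem.Dict String Bool) : List String :=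
  match fuel with
  | 0 => c
  | fuel + 1 =>
    let st := pvARound transactions_list c tl
    -- trobat2 = True; for y in temp_list2.values(): if y == False: trobat2 = False
    let trobat2 := st.2.values.foldl (fun t y => if y == false then false else t) true
    if trobat2 then st.1 else pvALoop transactions_list fuel st.1 st.2

def multipleInputsForUserImproved (user_address : String)
    (transactions_list : List (List (List (List String)))) : List String :=
  pvALoop transactions_list (pvFuel transactions_list + 2) [user_address]
    (PySem.Dict.empty.insert user_address false)

-- ===== PORT B =====
-- groups: for transaction in transactions_list: for i in range(0, len(transaction), 2): groups.append(transaction[i])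
def pvBGroups (transactions_list : List (List (List (List String)))) : List (List (List String)) :=
  transactions_list.foldl (fun gs transaction =>
    (PySem.List.pyRange 0 (PySem.List.len transaction) 2).foldl (fun gs i =>
      gs ++ [PySem.List.pyGetD transaction i []]) gs) []   -- i always in range, so pyGetD is exact

def pvBLoop (groups : List (List (List String))) (fuel : Nat)
    (cluster : List String) (seen : PySem.Set String) (qi : Nat) : List String :=
  match fuel with
  | 0 => cluster
  | fuel + 1 =>
    if h : qi < cluster.length then
      let x := cluster[qi]
      let st := groups.foldl (fun (st : List String × PySem.Set String) inputs =>
        if inputs.any (fun inputt => x ∈ inputt) then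
          inputs.foldl (fun st inputt =>
            -- a = inputt[0]; head? = none is IndexError, excluded by Pre_
            (inputt.head?).elim st (fun a =>
              if PySem.Set.contains st.2 a then st
              else (st.1 ++ [a], PySem.Set.add st.2 a))) st
        else st) (cluster, seen)
      pvBLoop groups fuel st.1 st.2 (qi + 1)
    else cluster

-- fuel: the loop runs once per final cluster element; same bound as for A.
def multipleInputsForUserImproved_alt (user_address : String)
    (transactions_list : List (List (List (List String)))) : List String :=
  pvBLoop (pvBGroups transactions_list) (pvFuel transactions_list + 2)
    [user_address] (PySem.Set.ofList [user_address]) 0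

-- ===== PRECONDITION & SPEC =====
-- the elements at even positions of a transaction (the input groups both programs read)
def pvEvens {α : Type} : List α → List α
  | [] => []
  | [a] => [a]
  | a :: _ :: r => a :: pvEvens r

-- Pre_ excludes inputs where some even-position input group contains an empty tuple: if such a
-- group is ever matched, A raises IndexError on inputt[0] (and so does B); on the remaining
-- excluded inputs (the empty tuple sits in a group no cluster address matches) A returns normally
-- and B returns the same value — Pre_ is a closed-form over-approximation of the raising inputs.
def Pre_multipleInputsForUserImproved (user_address : String)
    (transactions_list : List (List (List (List String)))) : Prop :=
  ∀ g ∈ transactions_list.flatMap pvEvens, ∀ inputt ∈ g, inputt ≠ []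
instance (user_address : String) (transactions_list : List (List (List (List String)))) : Decidable (Pre_multipleInputsForUserImproved user_address transactions_list) := by unfold Pre_multipleInputsForUserImproved; infer_instance

def pvWitness_multipleInputsForUserImproved : String × List (List (List (List String))) :=
  ("a", [[[["a", "b"], ["c"]], [["zz"]], [["b"], ["d", "c"]]], [[["d"], ["e"]]]])

def Spec_multipleInputsForUserImproved (user_address : String) (transactions_list : List (List (List (List String)))) (out : List String) : Prop := out = multipleInputsForUserImproved_alt user_address transactions_list
instance (user_address : String) (transactions_list : List (List (List (List String)))) (out : List String) : Decidable (Spec_multipleInputsForUserImproved user_address transactions_list out) := by unfold Spec_multipleInputsForUserImproved; infer_instance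

-- ===== CLAIM (what is proved, stated in full; the proofs are below) =====
def Claim_equal_multipleInputsForUserImproved : Prop := ∀ (user_address : String) (transactions_list : List (List (List (List String)))), Dom_multipleInputsForUserImproved user_address transactions_list → Pre_multipleInputsForUserImproved user_address transactions_list → Spec_multipleInputsForUserImproved user_address transactions_list (multipleInputsForUserImproved user_address transactions_list)

-- ===== LEMMAS AND PROOFS =====

-- canonical vocabulary: heads of a group, matched groups, the even-position groups of all transactions
def pvHeads (g : List (List String)) : List String := g.filterMap List.head?
def pvMatch (x : String) (g : List (List String)) : Bool := g.any (fun inputt => x ∈ inputt)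
def pvGroupsOf (ts : List (List (List (List String)))) : List (List (List String)) := ts.flatMap pvEvens
def pvAdd1 (c : List String) (a : String) : List String := if a ∈ c then c else c ++ [a]
def pvAddNew (c hs : List String) : List String := hs.foldl pvAdd1 c
def pvStep (gs : List (List (List String))) (x : String) (c : List String) : List String :=
  gs.foldl (fun c g => if pvMatch x g then pvAddNew c (pvHeads g) else c) c
def pvSeg (gs : List (List (List String))) (l : List String) (c : List String) : List String :=
  l.foldl (fun c x => pvStep gs x c) c
def pvNB (gs : List (List (List String))) (x a : String) : Prop :=
  ∃ g ∈ gs, pvMatch x g = true ∧ a ∈ pvHeads g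
def pvPool (u : String) (ts : List (List (List (List String)))) : List String :=
  u :: (ts.flatMap (fun t => t)).flatMap pvHeads
def pvF2 (st : List String × PySem.Dict String Bool) (a : String) : List String × PySem.Dict String Bool :=
  if a ∈ st.1 then st else (st.1 ++ [a], st.2.insert a false)
def pvExtF (t : PySem.Dict String Bool) (news : List String) : PySem.Dict String Bool :=
  news.foldl (fun d a => d.insert a false) t
def pvG2 (st : List String × PySem.Set String) (a : String) : List String × PySem.Set String :=
  if PySem.Set.contains st.2 a then st else (st.1 ++ [a], PySem.Set.add st.2 a)

-- the two canonical loops: A's rounds-to-fixpoint, B's queue BFS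
def pvFix (gs : List (List (List String))) : Nat → List String → List String
  | 0, c => c
  | fuel + 1, c => if pvSeg gs c c = c then pvSeg gs c c else pvFix gs fuel (pvSeg gs c c)

def pvBfs (gs : List (List (List String))) : Nat → List String → Nat → List String
  | 0, cs, _ => cs
  | fuel + 1, cs, qi => if h : qi < cs.length then pvBfs gs fuel (pvStep gs (cs[qi]) cs) (qi + 1) else cs

-- ---- pvAddNew basics ----
theorem pvAdd1_prefix (c : List String) (a : String) : c <+: pvAdd1 c a := by
  unfold pvAdd1; split
  · exact List.prefix_rfl
  · exact List.prefix_append c [a]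

theorem pvAddNew_prefix (c hs : List String) : c <+: pvAddNew c hs := by
  induction hs generalizing c with
  | nil => exact List.prefix_rfl
  | cons a hs ih => exact (pvAdd1_prefix c a).trans (ih (pvAdd1 c a))

theorem pvAddNew_subset_right (c hs : List String) : ∀ a ∈ hs, a ∈ pvAddNew c hs := by
  induction hs generalizing c with
  | nil => intro a h; cases h
  | cons b hs ih =>
    intro a h
    rcases List.mem_cons.1 h with rfl | h
    · refine (pvAddNew_prefix (pvAdd1 c a) hs).subset ?_
      unfold pvAdd1; split
      · assumption
      · simp
    · exact ih (pvAdd1 c b) a h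

theorem mem_pvAddNew (c hs : List String) (b : String) :
    b ∈ pvAddNew c hs ↔ b ∈ c ∨ b ∈ hs := by
  constructor
  · intro h
    induction hs generalizing c with
    | nil => exact Or.inl h
    | cons a hs ih =>
      rcases ih (pvAdd1 c a) h with h' | h'
      · unfold pvAdd1 at h'; split at h'
        · exact Or.inl h'
        · rcases List.mem_append.1 h' with h' | h'
          · exact Or.inl h'
          · simp at h'; subst h'; exact Or.inr (by simp)
      · exact Or.inr (List.mem_cons_of_mem _ h')
  · rintro (h | h)
    · exact (pvAddNew_prefix c hs).subset h
    · exact pvAddNew_subset_right c hs b h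

theorem pvAddNew_nodup (c hs : List String) (h : c.Nodup) : (pvAddNew c hs).Nodup := by
  induction hs generalizing c with
  | nil => exact h
  | cons a hs ih =>
    refine ih (pvAdd1 c a) ?_
    unfold pvAdd1; split
    · exact h
    · simpa using List.Nodup.append h (by simp) (by simpa [List.disjoint_singleton] using ‹a ∉ c›)

theorem pvAddNew_eq_self (c hs : List String) (h : ∀ a ∈ hs, a ∈ c) : pvAddNew c hs = c := by
  induction hs with
  | nil => rfl
  | cons a hs ih =>
    have ha : a ∈ c := h a (by simp)
    show pvAddNew (pvAdd1 c a) hs = c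
    rw [show pvAdd1 c a = c from if_pos ha]
    exact ih (fun b hb => h b (List.mem_cons_of_mem _ hb))

-- ---- pvStep ----
theorem pvStep_prefix (gs : List (List (List String))) (x : String) (c : List String) :
    c <+: pvStep gs x c := by
  induction gs generalizing c with
  | nil => exact List.prefix_rfl
  | cons g gs ih =>
    show c <+: pvStep gs x (if pvMatch x g then pvAddNew c (pvHeads g) else c)
    split
    · exact (pvAddNew_prefix c (pvHeads g)).trans (ih _)
    · exact ih c

theorem mem_pvStep (gs : List (List (List String))) (x : String) (c : List String) (b : String) :
    b ∈ pvStep gs x c ↔ b ∈ c ∨ pvNB gs x b := by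
  induction gs generalizing c with
  | nil => simp [pvStep, pvNB]
  | cons g gs ih =>
    show b ∈ pvStep gs x (if pvMatch x g then pvAddNew c (pvHeads g) else c) ↔ _
    have hNB : pvNB (g :: gs) x b ↔ (pvMatch x g = true ∧ b ∈ pvHeads g) ∨ pvNB gs x b := by
      unfold pvNB; simp; try tauto
    by_cases hm : pvMatch x g
    · rw [if_pos hm, ih, mem_pvAddNew, hNB]; tauto
    · rw [if_neg hm, ih, hNB]
      have : ¬ (pvMatch x g = true) := hm
      tauto

theorem pvStep_nodup (gs : List (List (List String))) (x : String) (c : List String)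
    (h : c.Nodup) : (pvStep gs x c).Nodup := by
  induction gs generalizing c with
  | nil => exact h
  | cons g gs ih =>
    show (pvStep gs x (if pvMatch x g then pvAddNew c (pvHeads g) else c)).Nodup
    split
    · exact ih _ (pvAddNew_nodup c _ h)
    · exact ih c h

theorem pvStep_eq_self (gs : List (List (List String))) (x : String) (c : List String)
    (h : ∀ a, pvNB gs x a → a ∈ c) : pvStep gs x c = c := by
  induction gs generalizing c with
  | nil => rfl
  | cons g gs ih =>
    show pvStep gs x (if pvMatch x g then pvAddNew c (pvHeads g) else c) = c
    by_cases hm : pvMatch x g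
    · rw [if_pos hm, pvAddNew_eq_self c _ (fun a ha => h a ⟨g, by simp, hm, ha⟩)]
      exact ih c (fun a ha => h a (by rcases ha with ⟨g', hg', h1, h2⟩; exact ⟨g', by simp [hg'], h1, h2⟩))
    · rw [if_neg hm]
      exact ih c (fun a ha => h a (by rcases ha with ⟨g', hg', h1, h2⟩; exact ⟨g', by simp [hg'], h1, h2⟩))

-- ---- pvSeg ----
theorem pvSeg_cons (gs : List (List (List String))) (x : String) (l c : List String) :
    pvSeg gs (x :: l) c = pvSeg gs l (pvStep gs x c) := rfl

theorem pvSeg_append (gs : List (List (List String))) (l1 l2 c : List String) :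
    pvSeg gs (l1 ++ l2) c = pvSeg gs l2 (pvSeg gs l1 c) := List.foldl_append

theorem pvSeg_prefix (gs : List (List (List String))) (l c : List String) : c <+: pvSeg gs l c := by
  induction l generalizing c with
  | nil => exact List.prefix_rfl
  | cons x l ih => exact (pvStep_prefix gs x c).trans (ih _)

theorem pvSeg_nodup (gs : List (List (List String))) (l c : List String) (h : c.Nodup) :
    (pvSeg gs l c).Nodup := by
  induction l generalizing c with
  | nil => exact h
  | cons x l ih => exact ih _ (pvStep_nodup gs x c h)

theorem pvSeg_eq_self (gs : List (List (List String))) (l c : List String)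
    (h : ∀ x ∈ l, ∀ a, pvNB gs x a → a ∈ c) : pvSeg gs l c = c := by
  induction l with
  | nil => rfl
  | cons x l ih =>
    rw [pvSeg_cons, pvStep_eq_self gs x c (h x (by simp))]
    exact ih (fun y hy a ha => h y (List.mem_cons_of_mem _ hy) a ha)

theorem pvSeg_closes (gs : List (List (List String))) (l c : List String) :
    ∀ x ∈ l, ∀ a, pvNB gs x a → a ∈ pvSeg gs l c := by
  induction l generalizing c with
  | nil => intro x hx; cases hx
  | cons y l ih =>
    intro x hx a ha
    rcases List.mem_cons.1 hx with rfl | hx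
    · rw [pvSeg_cons]
      exact (pvSeg_prefix gs l _).subset ((mem_pvStep gs x c a).2 (Or.inr ha))
    · exact ih _ x hx a ha

theorem mem_pvSeg (gs : List (List (List String))) (l c : List String) (b : String) :
    b ∈ pvSeg gs l c → b ∈ c ∨ ∃ x ∈ l, pvNB gs x b := by
  induction l generalizing c with
  | nil => exact fun h => Or.inl h
  | cons x l ih =>
    intro h
    rcases ih _ h with h' | h'
    · rcases (mem_pvStep gs x c b).1 h' with h'' | h''
      · exact Or.inl h''
      · exact Or.inr ⟨x, by simp, h''⟩
    · rcases h' with ⟨y, hy, hb⟩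
      exact Or.inr ⟨y, List.mem_cons_of_mem _ hy, hb⟩

-- ---- pool ----
theorem pvEvens_subset {α : Type} (l : List α) : ∀ a ∈ pvEvens l, a ∈ l := by
  induction l using pvEvens.induct with
  | case1 => intro a h; cases h
  | case2 b => intro a h; simpa [pvEvens] using h
  | case3 b b' r ih =>
    intro a h
    rcases List.mem_cons.1 h with rfl | h
    · simp
    · simp [ih a h]

theorem pvNB_pool (u : String) (ts : List (List (List (List String)))) (x a : String)
    (h : pvNB (pvGroupsOf ts) x a) : a ∈ pvPool u ts := by
  rcases h with ⟨g, hg, _, ha⟩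
  rcases List.mem_flatMap.1 hg with ⟨t, ht, hgt⟩
  refine List.mem_cons_of_mem _ (List.mem_flatMap.2 ⟨g, ?_, ha⟩)
  exact List.mem_flatMap.2 ⟨t, ht, pvEvens_subset t g hgt⟩

theorem pvSeg_pool (gs : List (List (List String))) (P l c : List String)
    (hNB : ∀ x a, pvNB gs x a → a ∈ P) (hc : ∀ b ∈ c, b ∈ P) :
    ∀ b ∈ pvSeg gs l c, b ∈ P := by
  intro b hb
  rcases mem_pvSeg gs l c b hb with h | ⟨y, _, h⟩
  · exact hc b h
  · exact hNB y b h

-- ---- chunk: running the BFS over indices qi..n-1 equals one fold over those elements ----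
theorem pvBfs_chunk (gs : List (List (List String))) :
    ∀ (k fb : Nat) (cl : List String) (qi n : Nat), n ≤ cl.length → qi + k = n →
      pvBfs gs (k + fb) cl qi = pvBfs gs fb (pvSeg gs ((cl.drop qi).take k) cl) n := by
  intro k
  induction k with
  | zero =>
    intro fb cl qi n _ h
    obtain rfl : n = qi := by omega
    simp [pvSeg]
  | succ k ih =>
    intro fb cl qi n hn h
    have hqi : qi < cl.length := by omega
    have heq : k + 1 + fb = (k + fb) + 1 := by omega
    rw [heq]
    have hdrop : cl.drop qi = cl[qi] :: cl.drop (qi + 1) := (List.getElem_cons_drop hqi).symm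
    simp only [pvBfs]
    rw [dif_pos hqi]
    rcases pvStep_prefix gs (cl[qi]) cl with ⟨rest, hrest⟩
    have hlen : cl.length ≤ (pvStep gs (cl[qi]) cl).length :=
      List.IsPrefix.length_le ⟨rest, hrest⟩
    have htk : ((pvStep gs (cl[qi]) cl).drop (qi + 1)).take k = (cl.drop (qi + 1)).take k := by
      rw [← hrest, List.drop_append_of_le_length (by omega),
        List.take_append_of_le_length (by simp; omega)]
    rw [ih fb (pvStep gs (cl[qi]) cl) (qi + 1) n (by omega) (by omega), htk, hdrop,
      List.take_succ_cons, pvSeg_cons]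

-- ---- MAIN: the round-fixpoint loop equals the queue BFS ----
theorem pvMain (gs : List (List (List String))) (P : List String)
    (hNB : ∀ x a, pvNB gs x a → a ∈ P) :
    ∀ (fa : Nat) (cs : List String) (qi fb : Nat), qi ≤ cs.length → cs.Nodup →
      (∀ b ∈ cs, b ∈ P) →
      (∀ j (hj : j < qi) (hj2 : j < cs.length), ∀ a, pvNB gs (cs[j]) a → a ∈ cs) →
      P.length + 1 ≤ fa + cs.length → P.length + 1 ≤ fb + qi →
      pvFix gs fa cs = pvBfs gs fb cs qi := by
  intro fa
  induction fa with
  | zero =>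
    intro cs qi fb hqi hnd hsub hcl hfa hfb
    have := (hnd.subperm hsub).length_le
    omega
  | succ fa ih =>
    intro cs qi fb hqi hnd hsub hcl hfa hfb
    have hlenP : cs.length ≤ P.length := (hnd.subperm hsub).length_le
    have hclosedtake : pvSeg gs (cs.take qi) cs = cs := by
      apply pvSeg_eq_self
      intro x hx a ha
      rcases List.mem_take_iff_getElem.1 hx with ⟨j, hj, rfl⟩
      exact hcl j (by omega) (by omega) a ha
    have hsplit : pvSeg gs cs cs = pvSeg gs (cs.drop qi) cs := by
      have haux : pvSeg gs (cs.take qi ++ cs.drop qi) cs = pvSeg gs (cs.drop qi) cs := by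
        rw [pvSeg_append, hclosedtake]
      rw [← haux, List.take_append_drop]
    have hpre : cs <+: pvSeg gs (cs.drop qi) cs := pvSeg_prefix gs _ cs
    have hk : (cs.drop qi).take (cs.length - qi) = cs.drop qi :=
      List.take_of_length_le (by simp)
    obtain ⟨fb', hfb'⟩ : ∃ fb', fb = (cs.length - qi) + fb' :=
      ⟨fb - (cs.length - qi), by omega⟩
    have hchunk : pvBfs gs fb cs qi = pvBfs gs fb' (pvSeg gs (cs.drop qi) cs) cs.length := by
      rw [hfb', pvBfs_chunk gs (cs.length - qi) fb' cs qi cs.length (le_refl _) (by omega), hk]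
    rw [hchunk]
    by_cases hfix : pvSeg gs cs cs = cs
    · have hcceq : pvSeg gs (cs.drop qi) cs = cs := by rw [← hsplit, hfix]
      rw [hcceq]
      obtain ⟨f', hf'⟩ : ∃ f', fb' = f' + 1 := ⟨fb' - 1, by omega⟩
      rw [hf']
      simp only [pvFix, pvBfs]
      rw [if_pos hfix, dif_neg (by omega)]
      exact hfix
    · have hne : pvSeg gs (cs.drop qi) cs ≠ cs := by rw [← hsplit]; exact hfix
      have hlt : cs.length < (pvSeg gs (cs.drop qi) cs).length := by
        rcases hpre with ⟨t, ht⟩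
        rcases t with _ | ⟨y, t⟩
        · exact absurd (by simpa using ht.symm) hne
        · rw [← ht]; simp
      simp only [pvFix]
      rw [if_neg hfix, hsplit]
      have hlenpre : cs.length ≤ (pvSeg gs (cs.drop qi) cs).length := hpre.length_le
      refine ih (pvSeg gs (cs.drop qi) cs) cs.length fb'
        (by omega) (pvSeg_nodup gs _ cs hnd) (pvSeg_pool gs P _ cs hNB hsub) ?_ (by omega) (by omega)
      intro j hj hj2 a ha
      have hj3 : j < cs.length := hj
      have hgetEq : (pvSeg gs (cs.drop qi) cs)[j] = cs[j]'hj3 := by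
        rcases hpre with ⟨t, ht⟩
        exact (List.getElem_of_eq ht.symm hj2).trans (List.getElem_append_left hj3)
      rw [hgetEq] at ha
      by_cases hjq : j < qi
      · exact hpre.subset (hcl j hjq hj3 a ha)
      · have hmem : cs[j]'hj3 ∈ cs.drop qi := by
          have h5 : j - qi < (cs.drop qi).length := by simp; omega
          have : (cs.drop qi)[j - qi] = cs[j]'hj3 := by
            rw [List.getElem_drop]
            congr 1
            omega
          rw [← this]
          exact List.getElem_mem h5
        exact pvSeg_closes gs (cs.drop qi) cs _ hmem a ha

-- ---- A-side reduction ----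
theorem pvF2_fold (hs : List String) :
    ∀ (c : List String) (t : PySem.Dict String Bool), t.keys = c →
      hs.foldl pvF2 (c, t) = (pvAddNew c hs, pvExtF t ((pvAddNew c hs).drop c.length)) ∧
      (pvExtF t ((pvAddNew c hs).drop c.length)).keys = pvAddNew c hs := by
  induction hs with
  | nil =>
    intro c t h
    refine ⟨by simp [pvAddNew, pvExtF], ?_⟩
    simpa [pvAddNew, pvExtF] using h
  | cons a hs ih =>
    intro c t h
    by_cases ha : a ∈ c
    · have h1 : pvF2 (c, t) a = (c, t) := by simp [pvF2, ha]
      have h2 : pvAddNew c (a :: hs) = pvAddNew c hs := by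
        show pvAddNew (pvAdd1 c a) hs = _
        rw [show pvAdd1 c a = c from if_pos ha]
      rw [List.foldl_cons, h1, h2]
      exact ih c t h
    · have hcont : t.contains a = false := by
        rw [← Bool.not_eq_true, PySem.Dict.contains_iff_mem_keys, h]
        exact ha
      have hkeys : (t.insert a false).keys = c ++ [a] := by
        rw [PySem.Dict.keys_insert_of_not_contains t false hcont, h]
      have h1 : pvF2 (c, t) a = (c ++ [a], t.insert a false) := by simp [pvF2, ha]
      have h2 : pvAddNew c (a :: hs) = pvAddNew (c ++ [a]) hs := by
        show pvAddNew (pvAdd1 c a) hs = _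
        rw [show pvAdd1 c a = c ++ [a] from if_neg ha]
      rcases ih (c ++ [a]) (t.insert a false) hkeys with ⟨ih1, ih2⟩
      rcases pvAddNew_prefix (c ++ [a]) hs with ⟨rest, hrest⟩
      have hd1 : (pvAddNew (c ++ [a]) hs).drop c.length = a :: rest := by
        rw [← hrest, List.append_assoc, List.drop_left]
        rfl
      have hd2 : (pvAddNew (c ++ [a]) hs).drop (c ++ [a]).length = rest := by
        rw [← hrest, List.drop_left]
      rw [hd2] at ih1 ih2
      constructor
      · rw [List.foldl_cons, h1, ih1, h2, hd1]
        rfl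
      · rw [h2, hd1]
        exact ih2
    

theorem pvExtF_comp (t : PySem.Dict String Bool) (c c1 X : List String)
    (h1 : c <+: c1) (h2 : c1 <+: X) :
    pvExtF (pvExtF t (c1.drop c.length)) (X.drop c1.length) = pvExtF t (X.drop c.length) := by
  rcases h1 with ⟨m, hm⟩
  rcases h2 with ⟨r, hr⟩
  subst hm
  subst hr
  simp only [List.append_assoc]
  rw [show ((c ++ (m ++ r)) : List String).drop (c ++ m).length = r from by
        rw [← List.append_assoc]; exact List.drop_left,
    show ((c ++ (m ++ r)) : List String).drop c.length = m ++ r from List.drop_left,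
    show ((c ++ m) : List String).drop c.length = m from List.drop_left]
  unfold pvExtF
  rw [List.foldl_append]

theorem pvExtF_items (news : List String) :
    ∀ (t : PySem.Dict String Bool), (∀ a ∈ news, a ∉ t.keys) → news.Nodup →
      (pvExtF t news).items = t.items ++ news.map (fun a => (a, false)) ∧
      (pvExtF t news).keys = t.keys ++ news := by
  induction news with
  | nil => intro t _ _; simp [pvExtF]
  | cons a news ih =>
    intro t h hn
    have hcont : t.contains a = false := by
      rw [← Bool.not_eq_true, PySem.Dict.contains_iff_mem_keys]
      exact h a (by simp)
    have hstep : pvExtF t (a :: news) = pvExtF (t.insert a false) news := rfl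
    have hfresh : ∀ b ∈ news, b ∉ (t.insert a false).keys := by
      intro b hb
      rw [PySem.Dict.keys_insert_of_not_contains t false hcont]
      intro hmem
      rcases List.mem_append.1 hmem with hmem | hmem
      · exact h b (List.mem_cons_of_mem _ hb) hmem
      · simp at hmem
        subst hmem
        exact (List.nodup_cons.1 hn).1 hb
    rcases ih (t.insert a false) hfresh (List.nodup_cons.1 hn).2 with ⟨i1, i2⟩
    constructor
    · rw [hstep, i1, PySem.Dict.items_insert_of_not_contains t false hcont]
      simp
    · rw [hstep, i2, PySem.Dict.keys_insert_of_not_contains t false hcont]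
      simp

theorem pvCandFold (inputs : List (List String)) (st : List String × PySem.Dict String Bool) :
    (PySem.List.pyRange 0 (PySem.List.len inputs) 1).foldl (fun st i =>
      ((PySem.List.pyGetD inputs i []).head?).elim st (fun a =>
        if a ∈ st.1 then st else (st.1 ++ [a], st.2.insert a false))) st
    = (pvHeads inputs).foldl pvF2 st := by
  rw [PySem.List.len_eq]
  refine (PySem.List.foldl_pyRange_zero_pyGetD' inputs []
    (fun st e => (e.head?).elim st (fun a =>
      if a ∈ st.1 then st else (st.1 ++ [a], st.2.insert a false))) st).trans ?_
  induction inputs generalizing st with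
  | nil => rfl
  | cons e r ih =>
    cases e with
    | nil => simpa [pvHeads] using ih _
    | cons a e' =>
      show r.foldl _ (pvF2 st a) = _
      rw [show pvHeads ((a :: e') :: r) = a :: pvHeads r from by simp [pvHeads]]
      exact ih (pvF2 st a)

theorem pvF2_fold_idem (hs : List String) (c : List String) (t : PySem.Dict String Bool)
    (h : t.keys = c) : hs.foldl pvF2 (hs.foldl pvF2 (c, t)) = hs.foldl pvF2 (c, t) := by
  rcases pvF2_fold hs c t h with ⟨h1, h2⟩
  rw [h1]
  rcases pvF2_fold hs (pvAddNew c hs) _ h2 with ⟨h3, _⟩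
  rw [h3, pvAddNew_eq_self _ hs (pvAddNew_subset_right c hs)]
  simp [pvExtF, List.drop_length]

theorem pvGroupFold (x : String) (g : List (List String)) :
    ∀ (l : List (List String)) (st : List String × PySem.Dict String Bool), st.2.keys = st.1 →
      l.foldl (fun st inputt => if x ∈ inputt then (pvHeads g).foldl pvF2 st else st) st =
        (if l.any (fun inputt => x ∈ inputt) then (pvHeads g).foldl pvF2 st else st) := by
  intro l
  induction l with
  | nil => intro st _; simp
  | cons inputt l ih =>
    intro st h
    obtain ⟨c, t⟩ := st
    rw [List.foldl_cons]
    by_cases hx : x ∈ inputt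
    · rw [if_pos hx]
      rcases pvF2_fold (pvHeads g) c t h with ⟨h1, h2⟩
      have hkeys1 : ((pvHeads g).foldl pvF2 (c, t)).2.keys = ((pvHeads g).foldl pvF2 (c, t)).1 := by
        rw [h1]
        exact h2
      rw [ih _ hkeys1]
      have hany : (inputt :: l).any (fun inputt => decide (x ∈ inputt)) = true := by simp [hx]
      rw [hany, if_pos rfl]
      split_ifs with hl
      · exact pvF2_fold_idem (pvHeads g) c t h
      · rfl
    · rw [if_neg hx, ih _ h]
      have hany : ((inputt :: l).any (fun inputt => decide (x ∈ inputt)))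
          = (l.any (fun inputt => decide (x ∈ inputt))) := by simp [hx]
      rw [hany]

theorem pvEnumFold (x : String) :
    ∀ (t : List (List (List String))) (m : Int) (st : List String × PySem.Dict String Bool),
      st.2.keys = st.1 →
      (PySem.List.enumerate t (2 * m)).foldl (fun st p =>
        if PySem.Int.mod p.1 2 == 0 then
          p.2.foldl (fun st inputt => if x ∈ inputt then (pvHeads p.2).foldl pvF2 st else st) st
        else st) st
      = (pvEvens t).foldl (fun st g => if pvMatch x g then (pvHeads g).foldl pvF2 st else st) st := by
  intro t
  induction t using pvEvens.induct with
  | case1 => intro m st _; rfl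
  | case2 g =>
    intro m st h
    rw [PySem.List.enumerate_cons]
    have hmod : (PySem.Int.mod (2 * m) 2 == 0) = true := by
      rw [beq_iff_eq, PySem.Int.mod_eq_zero_iff_dvd]
      exact ⟨m, rfl⟩
    show List.foldl _ _ [(2 * m, g)] = _
    rw [List.foldl_cons, List.foldl_nil]
    show (if (PySem.Int.mod (2 * m) 2 == 0) = true then _ else _) = _
    rw [hmod, if_pos rfl]
    show g.foldl (fun st inputt => if x ∈ inputt then (pvHeads g).foldl pvF2 st else st) st = _
    rw [pvGroupFold x g g st h]
    rfl
  | case3 g g2 r ih =>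
    intro m st h
    rw [PySem.List.enumerate_cons, PySem.List.enumerate_cons]
    have hmod : (PySem.Int.mod (2 * m) 2 == 0) = true := by
      rw [beq_iff_eq, PySem.Int.mod_eq_zero_iff_dvd]
      exact ⟨m, rfl⟩
    have hmod2 : (PySem.Int.mod (2 * m + 1) 2 == 0) = false := by
      rw [beq_eq_false_iff_ne, Ne, PySem.Int.mod_eq_zero_iff_dvd]
      rintro ⟨k, hk⟩
      omega
    rw [List.foldl_cons, List.foldl_cons]
    show List.foldl _ ((fun st (p : Int × List (List String)) =>
        if PySem.Int.mod p.1 2 == 0 then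
          p.2.foldl (fun st inputt => if x ∈ inputt then (pvHeads p.2).foldl pvF2 st else st) st
        else st)
      ((if (PySem.Int.mod (2 * m) 2 == 0) = true then
          g.foldl (fun st inputt => if x ∈ inputt then (pvHeads g).foldl pvF2 st else st) st
        else st)) (2 * m + 1, g2)) _ = _
    rw [hmod, if_pos rfl]
    show List.foldl _ (if (PySem.Int.mod (2 * m + 1) 2 == 0) = true then _ else _) _ = _
    rw [hmod2, if_neg (by simp)]
    have hst1 := pvGroupFold x g g st h
    rw [hst1, show (g.any fun inputt => decide (x ∈ inputt)) = pvMatch x g from rfl]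
    have hkeys1 : (if pvMatch x g then (pvHeads g).foldl pvF2 st else st).2.keys
        = (if pvMatch x g then (pvHeads g).foldl pvF2 st else st).1 := by
      obtain ⟨c, t⟩ := st
      split
      · rcases pvF2_fold (pvHeads g) c t h with ⟨h1, h2⟩
        rw [h1]
        exact h2
      · exact h
    have hm2 : (2 * m + 1) + 1 = 2 * (m + 1) := by ring
    rw [hm2, ih (m + 1) _ hkeys1]
    rfl

theorem pvGroupsFold (x : String) (gs : List (List (List String))) :
    ∀ (c : List String) (t : PySem.Dict String Bool), t.keys = c →
      gs.foldl (fun st g => if pvMatch x g then (pvHeads g).foldl pvF2 st else st) (c, t) =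
        (pvStep gs x c, pvExtF t ((pvStep gs x c).drop c.length)) ∧
      (pvExtF t ((pvStep gs x c).drop c.length)).keys = pvStep gs x c := by
  induction gs with
  | nil =>
    intro c t h
    refine ⟨by simp [pvStep, pvExtF, List.drop_length], ?_⟩
    simpa [pvStep, pvExtF, List.drop_length] using h
  | cons g gs ih =>
    intro c t h
    rw [List.foldl_cons]
    by_cases hm : pvMatch x g
    · have hstep : pvStep (g :: gs) x c = pvStep gs x (pvAddNew c (pvHeads g)) := by
        simp [pvStep, hm]
      rw [if_pos hm]
      rcases pvF2_fold (pvHeads g) c t h with ⟨h1, h2⟩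
      rw [h1]
      rcases ih (pvAddNew c (pvHeads g)) _ h2 with ⟨i1, i2⟩
      have hcomp := pvExtF_comp t c (pvAddNew c (pvHeads g)) (pvStep gs x (pvAddNew c (pvHeads g)))
        (pvAddNew_prefix _ _) (pvStep_prefix _ _ _)
      constructor
      · rw [i1, hstep, hcomp]
      · rw [hstep, ← hcomp]
        exact i2
    · have hstep : pvStep (g :: gs) x c = pvStep gs x c := by simp [pvStep, hm]
      rw [if_neg hm, hstep]
      exact ih c t h

theorem pvAProcess_eq (x : String) (ts : List (List (List (List String))))
    (c : List String) (t : PySem.Dict String Bool) (h : t.keys = c) :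
    pvAProcess x ts (c, t) =
      (pvStep (pvGroupsOf ts) x c, pvExtF t ((pvStep (pvGroupsOf ts) x c).drop c.length)) ∧
    (pvExtF t ((pvStep (pvGroupsOf ts) x c).drop c.length)).keys = pvStep (pvGroupsOf ts) x c := by
  have hshape : pvAProcess x ts (c, t) =
      ts.foldl (fun st tr =>
        (PySem.List.enumerate tr 0).foldl (fun st p =>
          if PySem.Int.mod p.1 2 == 0 then
            p.2.foldl (fun st inputt => if x ∈ inputt then (pvHeads p.2).foldl pvF2 st else st) st
          else st) st) (c, t) := by
    unfold pvAProcess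
    simp only [pvCandFold]
  rw [hshape]
  clear hshape
  induction ts generalizing c t with
  | nil =>
    refine ⟨by simp [pvGroupsOf, pvStep, pvExtF, List.drop_length], ?_⟩
    simpa [pvGroupsOf, pvStep, pvExtF, List.drop_length] using h
  | cons tr ts ih =>
    rw [List.foldl_cons]
    have henum := pvEnumFold x tr 0 (c, t) h
    simp only [mul_zero] at henum
    rw [henum]
    have hgf := pvGroupsFold x (pvEvens tr) c t h
    rw [hgf.1]
    rcases ih (pvStep (pvEvens tr) x c) _ hgf.2 with ⟨i1, i2⟩
    have hgrp : pvGroupsOf (tr :: ts) = pvEvens tr ++ pvGroupsOf ts := by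
      simp [pvGroupsOf]
    have hstep : pvStep (pvGroupsOf (tr :: ts)) x c
        = pvStep (pvGroupsOf ts) x (pvStep (pvEvens tr) x c) := by
      rw [hgrp]
      exact List.foldl_append
    have hcomp := pvExtF_comp t c (pvStep (pvEvens tr) x c)
      (pvStep (pvGroupsOf ts) x (pvStep (pvEvens tr) x c))
      (pvStep_prefix _ _ _) (pvStep_prefix _ _ _)
    constructor
    · rw [i1, hstep, hcomp]
    · rw [hstep, ← hcomp]
      exact i2

theorem pvRound_fold (ts : List (List (List (List String)))) :
    ∀ (s : List String) (c1 : List String) (t1 : PySem.Dict String Bool) (done : List String),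
      t1.keys = c1 → c1.Nodup → (∀ x ∈ s, x ∈ c1) → (∀ x ∈ done, x ∈ c1) →
      (∀ p ∈ t1.items, p.1 ∉ s → (p.2 = true ↔ p.1 ∈ done)) →
      (s.foldl (fun st x =>
          let st := pvAProcess x ts st
          (st.1, st.2.insert x true)) (c1, t1)).1 = pvSeg (pvGroupsOf ts) s c1 ∧
      (s.foldl (fun st x =>
          let st := pvAProcess x ts st
          (st.1, st.2.insert x true)) (c1, t1)).2.keys = pvSeg (pvGroupsOf ts) s c1 ∧
      (∀ p ∈ (s.foldl (fun st x =>
          let st := pvAProcess x ts st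
          (st.1, st.2.insert x true)) (c1, t1)).2.items, (p.2 = true ↔ p.1 ∈ done ++ s)) := by
  intro s
  induction s with
  | nil =>
    intro c1 t1 done hk _ _ _ hitems
    refine ⟨rfl, hk, ?_⟩
    intro p hp
    simpa using hitems p hp (by simp)
  | cons x s ih =>
    intro c1 t1 done hk hnd hs hdone hitems
    rcases pvAProcess_eq x ts c1 t1 hk with ⟨hproc, hkeys⟩
    rcases pvStep_prefix (pvGroupsOf ts) x c1 with ⟨news, hnews⟩
    have hdropnews : (pvStep (pvGroupsOf ts) x c1).drop c1.length = news := by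
      rw [← hnews, List.drop_left]
    rw [hdropnews] at hproc hkeys
    have hnodup2 : (pvStep (pvGroupsOf ts) x c1).Nodup := pvStep_nodup _ x c1 hnd
    have hnodups : c1.Nodup ∧ news.Nodup ∧ ∀ a ∈ c1, ∀ b ∈ news, a ≠ b := by
      rw [← List.nodup_append, hnews]
      exact hnodup2
    have hfresh : ∀ a ∈ news, a ∉ t1.keys := fun a ha hmem =>
      hnodups.2.2 a (hk ▸ hmem) a ha rfl
    rcases pvExtF_items news t1 hfresh hnodups.2.1 with ⟨hit, hkey⟩
    have hpre2 : c1 <+: pvStep (pvGroupsOf ts) x c1 := ⟨news, hnews⟩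
    have hxc1 : x ∈ c1 := hs x (by simp)
    have hcont : (pvExtF t1 news).contains x = true := by
      rw [PySem.Dict.contains_iff_mem_keys, hkey, hk]
      exact List.mem_append.2 (Or.inl hxc1)
    have hkeys2 : ((pvExtF t1 news).insert x true).keys = pvStep (pvGroupsOf ts) x c1 := by
      rw [PySem.Dict.keys_insert_of_contains _ true hcont]
      exact hkeys
    have hs' : ∀ y ∈ s, y ∈ pvStep (pvGroupsOf ts) x c1 := fun y hy =>
      hpre2.subset (hs y (List.mem_cons_of_mem _ hy))
    have hdone' : ∀ y ∈ done ++ [x], y ∈ pvStep (pvGroupsOf ts) x c1 := by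
      intro y hy
      rcases List.mem_append.1 hy with hy | hy
      · exact hpre2.subset (hdone y hy)
      · simp at hy
        subst hy
        exact hpre2.subset hxc1
    have hitems' : ∀ p ∈ ((pvExtF t1 news).insert x true).items, p.1 ∉ s →
        (p.2 = true ↔ p.1 ∈ done ++ [x]) := by
      intro p hp hps
      rcases (PySem.Dict.mem_items_insert _ x true p).1 hp with rfl | ⟨hpold, hpne⟩
      · simp
      · rw [hit] at hpold
        rcases List.mem_append.1 hpold with hpt | hpn
        · have hiff := hitems p hpt (by
            intro hmem
            rcases List.mem_cons.1 hmem with hmem | hmem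
            · exact hpne hmem
            · exact hps hmem)
          rw [hiff]
          simp [hpne]
        · rcases List.mem_map.1 hpn with ⟨a, han, rfl⟩
          have hanotc1 : a ∉ c1 := fun hac => hnodups.2.2 a hac a han rfl
          simp only []
          constructor
          · intro hfalse
            exact absurd hfalse (by simp)
          · intro hmem
            exfalso
            rcases List.mem_append.1 hmem with hmem | hmem
            · exact hanotc1 (hdone a hmem)
            · simp at hmem
              subst hmem
              exact hanotc1 hxc1
    have ihres := ih (pvStep (pvGroupsOf ts) x c1) ((pvExtF t1 news).insert x true)
      (done ++ [x]) hkeys2 hnodup2 hs' hdone' hitems'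
    rw [List.foldl_cons]
    simp only [hproc]
    refine ⟨?_, ?_, ?_⟩
    · rw [pvSeg_cons]
      exact ihres.1
    · rw [pvSeg_cons]
      exact ihres.2.1
    · intro p hp
      have := ihres.2.2 p hp
      simpa [List.append_assoc] using this

theorem pvAllTrue (ys : List Bool) : ∀ (b : Bool),
    ys.foldl (fun t y => if y == false then false else t) b = (b && ys.all (fun y => y)) := by
  induction ys with
  | nil => intro b; simp
  | cons y ys ih =>
    intro b
    cases y
    · rw [List.foldl_cons, show (if ((false == false) = true) then false else b) = false from rfl,
        ih]
      simp
    · rw [List.foldl_cons, show (if ((true == false) = true) then false else b) = b from rfl, ih]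
      simp

theorem pvALoop_eq (ts : List (List (List (List String)))) :
    ∀ (fuel : Nat) (c : List String) (t : PySem.Dict String Bool), t.keys = c → c.Nodup →
      pvALoop ts fuel c t = pvFix (pvGroupsOf ts) fuel c := by
  intro fuel
  induction fuel with
  | zero => intro c t _ _; rfl
  | succ fuel ih =>
    intro c t h hnd
    have hround : pvARound ts c t = c.foldl (fun st x =>
        let st := pvAProcess x ts st
        (st.1, st.2.insert x true)) (c, t) := by
      unfold pvARound
      rw [h]
    have hitems0 : ∀ p ∈ t.items, p.1 ∉ c → (p.2 = true ↔ p.1 ∈ ([] : List String)) := by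
      intro p hp hpc
      exact absurd (h ▸ PySem.Dict.mem_keys_of_mem_items t hp) hpc
    have hr := pvRound_fold ts c c t [] h hnd (fun y hy => hy) (by intro y hy; cases hy) hitems0
    rw [← hround] at hr
    rcases hr with ⟨hr1, hr2, hr3⟩
    have hkm : (pvARound ts c t).2.keys = ((pvARound ts c t).2.items).map (fun p => p.1) := rfl
    have hvm : (pvARound ts c t).2.values = ((pvARound ts c t).2.items).map (fun p => p.2) := rfl
    have hvals : ((pvARound ts c t).2.values.foldl (fun t y => if y == false then false else t) true)
        = true ↔ pvSeg (pvGroupsOf ts) c c = c := by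
      rw [pvAllTrue]
      simp only [Bool.true_and]
      constructor
      · intro hall
        have hsub : pvSeg (pvGroupsOf ts) c c ⊆ c := by
          rw [← hr2, hkm]
          intro k hkmem
          rcases List.mem_map.1 hkmem with ⟨p, hp, rfl⟩
          have hptrue : p.2 = true := by
            have h2 := List.all_eq_true.1 hall p.2 (by
              rw [hvm]
              exact List.mem_map.2 ⟨p, hp, rfl⟩)
            simpa using h2
          simpa using (hr3 p hp).1 hptrue
        have hpre := pvSeg_prefix (pvGroupsOf ts) c c
        have hlenle : (pvSeg (pvGroupsOf ts) c c).length ≤ c.length :=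
          ((pvSeg_nodup _ c c hnd).subperm hsub).length_le
        exact (hpre.eq_of_length (le_antisymm hpre.length_le hlenle)).symm
      · intro heq
        apply List.all_eq_true.2
        intro y hy
        rw [hvm] at hy
        rcases List.mem_map.1 hy with ⟨p, hp, rfl⟩
        show p.2 = true
        apply (hr3 p hp).2
        have hkmem : p.1 ∈ (pvARound ts c t).2.keys := PySem.Dict.mem_keys_of_mem_items _ hp
        rw [hr2, heq] at hkmem
        simpa using hkmem
    have hunfoldA : pvALoop ts (fuel + 1) c t =
        (if ((pvARound ts c t).2.values.foldl (fun t y => if y == false then false else t) true) = true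
         then (pvARound ts c t).1
         else pvALoop ts fuel (pvARound ts c t).1 (pvARound ts c t).2) := rfl
    have hunfoldF : pvFix (pvGroupsOf ts) (fuel + 1) c =
        (if pvSeg (pvGroupsOf ts) c c = c then pvSeg (pvGroupsOf ts) c c
         else pvFix (pvGroupsOf ts) fuel (pvSeg (pvGroupsOf ts) c c)) := rfl
    rw [hunfoldA, hunfoldF]
    by_cases hfix : pvSeg (pvGroupsOf ts) c c = c
    · rw [if_pos (hvals.2 hfix), if_pos hfix, hr1]
    · rw [if_neg (fun hh => hfix (hvals.1 hh)), if_neg hfix,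
        ih (pvARound ts c t).1 (pvARound ts c t).2 (by rw [hr2, hr1])
          (by rw [hr1]; exact pvSeg_nodup _ c c hnd), hr1]

-- ---- B-side reduction ----
theorem pvBGroups_eq (ts : List (List (List (List String)))) : pvBGroups ts = pvGroupsOf ts := by
  have hkey : ∀ (tr : List (List (List String))) (gs : List (List (List String))),
      List.foldl (fun gs (k : Nat) => gs ++ [PySem.List.pyGetD tr (0 + 2 * (k : Int)) []]) gs
        (List.range ((tr.length + 1) / 2)) = gs ++ pvEvens tr := by
    intro tr
    induction tr using pvEvens.induct with
    | case1 => intro gs; simp [pvEvens]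
    | case2 a =>
      intro gs
      norm_num [List.range_succ, pvEvens, PySem.List.pyGetD_zero_cons]
    | case3 a b r ih =>
      intro gs
      have hK : ((a :: b :: r).length + 1) / 2 = (r.length + 1) / 2 + 1 := by
        simp only [List.length_cons]
        omega
      rw [hK, List.range_succ_eq_map, List.foldl_cons, List.foldl_map]
      have h0 : PySem.List.pyGetD (a :: b :: r) (0 + 2 * ((0 : Nat) : Int)) [] = a := by
        norm_num [PySem.List.pyGetD_zero_cons]
      rw [h0]
      have hbody : ∀ (gs : List (List (List String))) (k : Nat),
          gs ++ [PySem.List.pyGetD (a :: b :: r) (0 + 2 * ((Nat.succ k : Nat) : Int)) []]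
          = gs ++ [PySem.List.pyGetD r (0 + 2 * ((k : Nat) : Int)) []] := by
        intro gs k
        congr 1
        have e1 : (0 + 2 * ((Nat.succ k : Nat) : Int)) = ((2 * k + 2 : Nat) : Int) := by
          push_cast
          ring
        have e2 : (0 + 2 * ((k : Nat) : Int)) = ((2 * k : Nat) : Int) := by
          push_cast
          ring
        rw [e1, e2, PySem.List.pyGetD_natCast, PySem.List.pyGetD_natCast]
        have e3 : 2 * k + 2 = (2 * k + 1) + 1 := by omega
        rw [e3, List.getD_cons_succ, List.getD_cons_succ]
      simp only [hbody]
      rw [ih (gs ++ [a])]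
      simp [pvEvens]
  have hper : ∀ (tr : List (List (List String))) (gs : List (List (List String))),
      (PySem.List.pyRange 0 (PySem.List.len tr) 2).foldl
        (fun gs i => gs ++ [PySem.List.pyGetD tr i []]) gs = gs ++ pvEvens tr := by
    intro tr gs
    rw [PySem.List.len_eq, PySem.List.pyRange_of_pos 0 (tr.length : Int) (by norm_num),
      show (if (0 : Int) < (tr.length : Int) then (((tr.length : Int) - 0 + 2 - 1) / 2).toNat else 0)
        = (tr.length + 1) / 2 from by split_ifs with h0 <;> omega,
      List.foldl_map]
    exact hkey tr gs
  unfold pvBGroups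
  simp only [hper]
  rw [PySem.List.foldl_append_eq_flatMap pvEvens ts []]
  rfl

theorem pvBCandFold (g : List (List String)) (st : List String × PySem.Set String) :
    g.foldl (fun st inputt =>
      (inputt.head?).elim st (fun a =>
        if PySem.Set.contains st.2 a then st else (st.1 ++ [a], PySem.Set.add st.2 a))) st
    = (pvHeads g).foldl pvG2 st := by
  induction g generalizing st with
  | nil => rfl
  | cons e r ih =>
    cases e with
    | nil => simpa [pvHeads] using ih _
    | cons a e' =>
      show r.foldl _ (pvG2 st a) = _
      rw [show pvHeads ((a :: e') :: r) = a :: pvHeads r from by simp [pvHeads]]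
      exact ih (pvG2 st a)

theorem pvG2_diag (hs : List String) : ∀ (c : List String),
    hs.foldl pvG2 (c, c) = (pvAddNew c hs, pvAddNew c hs) := by
  induction hs with
  | nil => intro c; rfl
  | cons a hs ih =>
    intro c
    rw [List.foldl_cons]
    by_cases ha : a ∈ c
    · have hc : PySem.Set.contains (c : PySem.Set String) a = true :=
        (PySem.Set.contains_iff c a).2 ha
      have h1 : pvG2 (c, c) a = (c, c) := by simp [pvG2, ha]
      have h2 : pvAddNew c (a :: hs) = pvAddNew c hs := by
        show pvAddNew (pvAdd1 c a) hs = _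
        rw [show pvAdd1 c a = c from if_pos ha]
      rw [h1, h2]
      exact ih c
    · have hc : PySem.Set.contains (c : PySem.Set String) a = false := by
        rw [← Bool.not_eq_true, PySem.Set.contains_iff]
        exact ha
      have h1 : pvG2 (c, c) a = (c ++ [a], c ++ [a]) := by
        simp [pvG2, ha, PySem.Set.add_of_not_mem ha]
      have h2 : pvAddNew c (a :: hs) = pvAddNew (c ++ [a]) hs := by
        show pvAddNew (pvAdd1 c a) hs = _
        rw [show pvAdd1 c a = c ++ [a] from if_neg ha]
      rw [h1, h2]
      exact ih (c ++ [a])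

theorem pvBGroupsFold_diag (x : String) (gs : List (List (List String))) : ∀ (c : List String),
    gs.foldl (fun (st : List String × PySem.Set String) inputs =>
      if inputs.any (fun inputt => x ∈ inputt) then
        inputs.foldl (fun st inputt =>
          (inputt.head?).elim st (fun a =>
            if PySem.Set.contains st.2 a then st else (st.1 ++ [a], PySem.Set.add st.2 a))) st
      else st) (c, c)
    = (pvStep gs x c, pvStep gs x c) := by
  induction gs with
  | nil => intro c; rfl
  | cons g gs ih =>
    intro c
    rw [List.foldl_cons]
    by_cases hm : g.any (fun inputt => decide (x ∈ inputt)) = true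
    · rw [if_pos hm, pvBCandFold g (c, c), pvG2_diag (pvHeads g) c, ih (pvAddNew c (pvHeads g))]
      have hstep : pvStep (g :: gs) x c = pvStep gs x (pvAddNew c (pvHeads g)) := by
        unfold pvStep
        rw [List.foldl_cons, if_pos (show pvMatch x g = true from hm)]
      rw [hstep]
    · rw [if_neg hm, ih c]
      have hstep : pvStep (g :: gs) x c = pvStep gs x c := by
        unfold pvStep
        rw [List.foldl_cons, if_neg (show ¬ pvMatch x g = true from hm)]
      rw [hstep]

theorem pvBLoop_eq (gs : List (List (List String))) :
    ∀ (fuel : Nat) (c : List String) (qi : Nat),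
      pvBLoop gs fuel c c qi = pvBfs gs fuel c qi := by
  intro fuel
  induction fuel with
  | zero => intro cl qi; rfl
  | succ fuel ih =>
    intro cl qi
    by_cases h : qi < cl.length
    · have hA : pvBLoop gs (fuel + 1) cl cl qi
          = pvBLoop gs fuel (pvStep gs (cl[qi]) cl) (pvStep gs (cl[qi]) cl) (qi + 1) := by
        simp only [pvBLoop]
        rw [dif_pos h]
        rw [pvBGroupsFold_diag (cl[qi]) gs cl]
      have hB : pvBfs gs (fuel + 1) cl qi = pvBfs gs fuel (pvStep gs (cl[qi]) cl) (qi + 1) := by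
        simp only [pvBfs]
        rw [dif_pos h]
      rw [hA, hB]
      exact ih _ _
    · simp only [pvBLoop, pvBfs]
      rw [dif_neg h, dif_neg h]

-- ---- fuel bound ----
theorem pvPool_le (u : String) (ts : List (List (List (List String)))) :
    (pvPool u ts).length ≤ pvFuel ts + 1 := by
  have hfold : ∀ (l : List (List (List String))) (n : Nat),
      l.foldl (fun n g => n + g.length) n = n + (l.map List.length).sum := by
    intro l
    induction l with
    | nil => intro n; simp
    | cons g l ih =>
      intro n
      rw [List.foldl_cons, ih]
      simp
      omega
  unfold pvPool pvFuel
  rw [hfold]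
  simp only [List.length_cons, List.length_flatMap]
  have hle : ((ts.flatMap fun t => t).map fun a => (pvHeads a).length).sum
      ≤ ((ts.flatMap fun t => t).map List.length).sum :=
    List.sum_le_sum (fun g _ => by simpa [pvHeads] using List.length_filterMap_le List.head? g)
  omega

-- ===== VERDICT (by name: the statement is the Claim_ definition above) =====
theorem multipleInputsForUserImproved_spec : Claim_equal_multipleInputsForUserImproved := by
  intro u ts _hdom _hpre
  unfold Spec_multipleInputsForUserImproved
  show multipleInputsForUserImproved u ts = multipleInputsForUserImproved_alt u ts
  unfold multipleInputsForUserImproved multipleInputsForUserImproved_alt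
  have hkeys : (PySem.Dict.empty.insert u false : PySem.Dict String Bool).keys = [u] := by
    rw [PySem.Dict.keys_insert_of_not_contains _ _ (by rfl)]
    rfl
  rw [pvALoop_eq ts (pvFuel ts + 2) [u] _ hkeys (by simp), pvBGroups_eq,
    show (PySem.Set.ofList [u] : PySem.Set String) = [u] from rfl,
    pvBLoop_eq (pvGroupsOf ts) (pvFuel ts + 2) [u] 0]
  have hpool := pvPool_le u ts
  refine pvMain (pvGroupsOf ts) (pvPool u ts) (fun x a hx => pvNB_pool u ts x a hx)
    (pvFuel ts + 2) [u] 0 (pvFuel ts + 2) (by simp) (by simp) ?_ ?_ ?_ ?_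
  · intro b hb
    simp at hb
    subst hb
    simp [pvPool]
  · intro j hj
    exact absurd hj (by omega)
  · simp
    omega
  · omega
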